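-- pv_equiv track=rewrite | github.com/Auro-rium/aex | src/aex/daemon/db/connection.py | _normalize_sql
-- ===== SOURCE A (Python) =====
-- def _normalize_sql(query: str) -> str:
--     q = query
--     if "BEGIN IMMEDIATE" in q:
--         q = q.replace("BEGIN IMMEDIATE", "BEGIN")
--     if "AUTOINCREMENT" in q:
--         q = q.replace("AUTOINCREMENT", "")
--
--     # Translate SQLite-style '?' placeholders to PostgreSQL '%s'.
--     out: list[str] = []
--     in_single = False
--     in_double = False
--     i = 0
--     while i < len(q):
--         ch = q[i]
--         if ch == "'" and not in_double:
--             in_single = not in_single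
--             out.append(ch)
--             i += 1
--             continue
--         if ch == '"' and not in_single:
--             in_double = not in_double
--             out.append(ch)
--             i += 1
--             continue
--         if ch == "?" and not in_single and not in_double:
--             out.append("%s")
--             i += 1
--             continue
--         out.append(ch)
--         i += 1
--     return "".join(out)
-- ===== SOURCE B (Python) =====
-- def _normalize_sql(query: str) -> str:
--     q = query
--     if "BEGIN IMMEDIATE" in q:
--         q = q.replace("BEGIN IMMEDIATE", "BEGIN")
--     if "AUTOINCREMENT" in q:
--         q = q.replace("AUTOINCREMENT", "")
--
--     # Translate '?' placeholders chunk-wise: copy quoted spans verbatim,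
--     # rewrite '?' -> '%s' only in the unquoted chunks between them.
--     out = []
--     i = 0
--     n = len(q)
--     while i < n:
--         js = q.find("'", i)
--         jd = q.find('"', i)
--         cands = [x for x in (js, jd) if x != -1]
--         j = min(cands) if cands else n
--         out.append(q[i:j].replace("?", "%s"))
--         if j >= n:
--             break
--         quote = q[j]
--         k = q.find(quote, j + 1)
--         if k == -1:
--             out.append(q[j:])  # unterminated quote: rest is literal
--             break
--         out.append(q[j:k + 1])  # quoted span copied verbatim
--         i = k + 1
--     return "".join(out)
-- ===== Notes on version B (the rewrite author's own statement) =====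
-- stated objective: faster
-- what changed: Replaces A's character-by-character scanner with in_single/in_double boolean state by a chunked scan that jumps to the next quote with str.find, translates placeholders in the unquoted chunk with one str.replace, and copies each quoted span verbatim.
import Mathlib
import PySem

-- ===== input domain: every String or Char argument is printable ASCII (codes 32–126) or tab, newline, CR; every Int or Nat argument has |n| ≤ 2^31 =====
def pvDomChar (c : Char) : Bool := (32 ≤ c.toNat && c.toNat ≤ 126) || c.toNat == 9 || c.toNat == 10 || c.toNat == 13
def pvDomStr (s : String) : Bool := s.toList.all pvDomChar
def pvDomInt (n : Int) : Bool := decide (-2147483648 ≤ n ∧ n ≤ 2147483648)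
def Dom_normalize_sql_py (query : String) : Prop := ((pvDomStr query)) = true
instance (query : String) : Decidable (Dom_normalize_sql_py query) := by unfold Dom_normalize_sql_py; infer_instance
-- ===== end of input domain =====

-- B replaces A's char-by-char in_single/in_double state machine by a chunked scan
-- (copy quoted spans verbatim, translate '?' only in the unquoted chunks); objective: alternative.

-- ===== PORT A =====
-- the while loop of A: char at a time, with the two quoting flags
def pvALoop : List Char → Bool → Bool → List Char
  | [], _, _ => []
  | c :: rest, inS, inD =>
    if c = '\'' ∧ inD = false then c :: pvALoop rest (!inS) inD
    else if c = '"' ∧ inS = false then c :: pvALoop rest inS (!inD)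
    else if c = '?' ∧ inS = false ∧ inD = false then '%' :: 's' :: pvALoop rest inS inD
    else c :: pvALoop rest inS inD

def normalize_sql_py (query : String) : String :=
  let q0 := query
  let q1 := if PySem.Str.isIn "BEGIN IMMEDIATE" q0 then PySem.Str.replace q0 "BEGIN IMMEDIATE" "BEGIN" else q0
  let q2 := if PySem.Str.isIn "AUTOINCREMENT" q1 then PySem.Str.replace q1 "AUTOINCREMENT" "" else q1
  String.ofList (pvALoop q2.toList false false)

-- ===== PORT B =====
def pvNotQuote (c : Char) : Bool := !(c == '\'' || c == '"')

-- the chunked while loop of B: unquoted chunk up to the next quote, translated by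
-- str.replace; then the quoted span (up to the closing quote found by str.find) verbatim
def pvBLoop (cs : List Char) : List Char :=
  match _hr : cs.dropWhile pvNotQuote with
  | [] => PySem.Chars.replace (cs.takeWhile pvNotQuote) ['?'] ['%', 's']
  | q :: tail =>
    match _hr2 : tail.dropWhile (fun c => c != q) with
    | [] => PySem.Chars.replace (cs.takeWhile pvNotQuote) ['?'] ['%', 's'] ++ q :: tail
    | _ :: tail2 =>
      PySem.Chars.replace (cs.takeWhile pvNotQuote) ['?'] ['%', 's'] ++
        (q :: tail.takeWhile (fun c => c != q) ++ [q]) ++ pvBLoop tail2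
termination_by cs.length
decreasing_by
  have h1 := List.length_dropWhile_le pvNotQuote cs
  have h2 := List.length_dropWhile_le (fun c => c != q) tail
  rw [_hr] at h1
  rw [_hr2] at h2
  simp at h1 h2
  omega

def normalize_sql_py_alt (query : String) : String :=
  let q0 := query
  let q1 := if PySem.Str.isIn "BEGIN IMMEDIATE" q0 then PySem.Str.replace q0 "BEGIN IMMEDIATE" "BEGIN" else q0
  let q2 := if PySem.Str.isIn "AUTOINCREMENT" q1 then PySem.Str.replace q1 "AUTOINCREMENT" "" else q1
  String.ofList (pvBLoop q2.toList)

-- ===== PRECONDITION & SPEC =====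
def Spec_normalize_sql_py (query : String) (out : String) : Prop := out = normalize_sql_py_alt query
instance (query : String) (out : String) : Decidable (Spec_normalize_sql_py query out) := by unfold Spec_normalize_sql_py; infer_instance

-- ===== CLAIM (what is proved, stated in full; the proofs are below) =====
def Claim_equal_normalize_sql_py : Prop := ∀ (query : String), Dom_normalize_sql_py query → Spec_normalize_sql_py query (normalize_sql_py query)

-- ===== LEMMAS AND PROOFS =====

def pvTr (c : Char) : List Char := if c = '?' then ['%', 's'] else [c]

-- single-char str.replace is flatMap of the pointwise translation
theorem pv_replace_go_eq (new : List Char) (l : List Char) :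
    ∀ (fuel : Nat) (acc : List Char), l.length ≤ fuel →
      PySem.Chars.replace.go ['?'] new fuel l acc
        = acc.reverse ++ l.flatMap (fun c => if c = '?' then new else [c]) := by
  induction l with
  | nil =>
    intro fuel acc _
    cases fuel <;> simp [PySem.Chars.replace.go]
  | cons c t ih =>
    intro fuel acc hle
    cases fuel with
    | zero => simp at hle
    | succ n =>
      have hle' : t.length ≤ n := by simp at hle; omega
      by_cases hc : c = '?'
      · subst hc
        rw [PySem.Chars.replace.go]
        rw [if_pos (by simp [List.isPrefixOf])]
        rw [show List.drop (['?'].length) ('?' :: t) = t from rfl]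
        rw [ih n (new.reverse ++ acc) hle']
        simp
      · rw [PySem.Chars.replace.go]
        have hpre : (['?'].isPrefixOf (c :: t)) = false := by
          simp [List.isPrefixOf]
          exact fun h => hc h.symm
        rw [hpre, if_neg Bool.false_ne_true]
        rw [ih n (c :: acc) hle']
        simp [hc]

theorem pv_replace_eq (l : List Char) :
    PySem.Chars.replace l ['?'] ['%', 's'] = l.flatMap pvTr := by
  unfold PySem.Chars.replace
  rw [if_neg (by simp)]
  rw [pv_replace_go_eq ['%', 's'] l l.length [] (le_refl _)]
  simp only [List.reverse_nil, List.nil_append]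
  rfl

-- A's loop over a quote-free chunk (state outside strings) translates pointwise
theorem pvALoop_pre (pre rest : List Char) (h : ∀ c ∈ pre, pvNotQuote c = true) :
    pvALoop (pre ++ rest) false false = pre.flatMap pvTr ++ pvALoop rest false false := by
  induction pre with
  | nil => simp
  | cons c t ih =>
    have hc := h c (by simp)
    have h1 : ¬ (c = '\'') := by simp [pvNotQuote] at hc; exact hc.1
    have h2 : ¬ (c = '"') := by simp [pvNotQuote] at hc; exact hc.2
    have ih' := ih (fun x hx => h x (List.mem_cons_of_mem _ hx))
    by_cases hq : c = '?'
    · subst hq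
      simp [pvALoop, h1, h2, ih', pvTr]
    · simp [pvALoop, h1, h2, hq, ih', pvTr]

-- A's loop inside a single-quoted span copies verbatim
theorem pvALoop_single (body rest : List Char) (h : '\'' ∉ body) :
    pvALoop (body ++ rest) true false = body ++ pvALoop rest true false := by
  induction body with
  | nil => simp
  | cons c t ih =>
    have hc : ¬ (c = '\'') := fun hh => h (by simp [hh])
    have ih' := ih (fun hh => h (List.mem_cons_of_mem _ hh))
    simp [pvALoop, hc, ih']

theorem pvALoop_single' (cs : List Char) (h : '\'' ∉ cs) :
    pvALoop cs true false = cs := by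
  simpa [pvALoop] using pvALoop_single cs [] h

-- A's loop inside a double-quoted span copies verbatim
theorem pvALoop_double (body rest : List Char) (h : '"' ∉ body) :
    pvALoop (body ++ rest) false true = body ++ pvALoop rest false true := by
  induction body with
  | nil => simp
  | cons c t ih =>
    have hc : ¬ (c = '"') := fun hh => h (by simp [hh])
    have ih' := ih (fun hh => h (List.mem_cons_of_mem _ hh))
    simp [pvALoop, hc, ih']

theorem pvALoop_double' (cs : List Char) (h : '"' ∉ cs) :
    pvALoop cs false true = cs := by
  simpa [pvALoop] using pvALoop_double cs [] h

-- head of a dropWhile residue fails the predicate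
theorem pv_dropWhile_cons_not {α : Type} {p : α → Bool} {l t : List α} {a : α}
    (h : l.dropWhile p = a :: t) : p a = false := by
  induction l with
  | nil => simp at h
  | cons c r ih =>
    rw [List.dropWhile_cons] at h
    by_cases hc : p c
    · rw [if_pos hc] at h; exact ih h
    · rw [if_neg hc] at h
      cases h
      simpa using hc

-- the two loops agree (strong induction following B's chunking)
theorem pv_main_aux : ∀ (n : Nat) (cs : List Char), cs.length ≤ n →
    pvALoop cs false false = pvBLoop cs := by
  intro n
  induction n with
  | zero =>
    intro cs h
    have : cs = [] := List.length_eq_zero_iff.mp (Nat.le_zero.mp h)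
    subst this
    rw [pvBLoop]
    rfl
  | succ n ih =>
    intro cs hlen
    have hpre : ∀ c ∈ cs.takeWhile pvNotQuote, pvNotQuote c = true :=
      fun c hc => List.mem_takeWhile_imp hc
    rw [pvBLoop]
    split
    · next heq =>
      have hcs : cs.takeWhile pvNotQuote ++ ([] : List Char) = cs := by
        rw [← heq]; exact List.takeWhile_append_dropWhile
      conv_lhs => rw [← hcs]
      rw [pvALoop_pre _ _ hpre, pv_replace_eq]
      simp [pvALoop]
    · next q tail heq =>
      have hq0 : pvNotQuote q = false := pv_dropWhile_cons_not heq
      have hql : q = '\'' ∨ q = '"' := by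
        simp [pvNotQuote] at hq0
        tauto
      have hcs : cs.takeWhile pvNotQuote ++ (q :: tail) = cs := by
        rw [← heq]; exact List.takeWhile_append_dropWhile
      split
      · next heq2 =>
        have hnq : q ∉ tail := by
          intro hmem
          have := List.dropWhile_eq_nil_iff.mp heq2 _ hmem
          simp at this
        conv_lhs => rw [← hcs]
        rw [pvALoop_pre _ _ hpre, pv_replace_eq]
        congr 1
        rcases hql with h | h <;> subst h
        · have e1 : pvALoop ('\'' :: tail) false false = '\'' :: pvALoop tail true false := by
            simp [pvALoop]
          rw [e1, pvALoop_single' tail hnq]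
        · have e1 : pvALoop ('"' :: tail) false false = '"' :: pvALoop tail false true := by
            simp [pvALoop]
          rw [e1, pvALoop_double' tail hnq]
      · next x tail2 heq2 =>
        have hx : x = q := by
          have := pv_dropWhile_cons_not heq2
          simpa using this
        subst hx
        have hbody : x ∉ tail.takeWhile (fun c => c != x) := by
          intro hmem
          have := List.mem_takeWhile_imp hmem
          simp at this
        have htail : tail.takeWhile (fun c => c != x) ++ x :: tail2 = tail := by
          rw [← heq2]; exact List.takeWhile_append_dropWhile
        have hlen2 : tail2.length ≤ n := by
          have h1 := List.length_dropWhile_le pvNotQuote cs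
          have h2 := List.length_dropWhile_le (fun c => c != x) tail
          rw [heq] at h1; rw [heq2] at h2
          simp at h1 h2; omega
        have hIH := ih tail2 hlen2
        conv_lhs => rw [← hcs]
        rw [pvALoop_pre _ _ hpre, pv_replace_eq]
        rcases hql with h | h <;> subst h
        · have e1 : pvALoop ('\'' :: tail) false false = '\'' :: pvALoop tail true false := by
            simp [pvALoop]
          rw [e1]
          conv_lhs => rw [← htail]
          rw [pvALoop_single _ _ hbody]
          have e2 : pvALoop ('\'' :: tail2) true false = '\'' :: pvALoop tail2 false false := by
            simp [pvALoop]
          rw [e2, hIH]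
          simp
        · have e1 : pvALoop ('"' :: tail) false false = '"' :: pvALoop tail false true := by
            simp [pvALoop]
          rw [e1]
          conv_lhs => rw [← htail]
          rw [pvALoop_double _ _ hbody]
          have e2 : pvALoop ('"' :: tail2) false true = '"' :: pvALoop tail2 false false := by
            simp [pvALoop]
          rw [e2, hIH]
          simp

theorem pv_main (cs : List Char) : pvALoop cs false false = pvBLoop cs :=
  pv_main_aux cs.length cs (le_refl _)

theorem normalize_sql_py_spec : Claim_equal_normalize_sql_py := by
  intro query _
  unfold Spec_normalize_sql_py normalize_sql_py normalize_sql_py_alt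
  simp only
  rw [pv_main]
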